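-- pv_equiv track=rewrite | github.com/qeedquan/challenges | codegolf/convert-a-non-negative-integer-to-barbrack.py | int2barbrack
-- ===== SOURCE A (Python) =====
-- def int2barbrack(n):
--     if n < 1:
--         return ""
--
--     r = ""
--     p = 2
--     i = 2
--     while n > 1:
--         w = 1
--         while n%i < 1:
--             n //= i
--             w += 1
--         r += "|"*(p % i) + int2barbrack(w - 1)
--         p *= i * i * 2
--         i += 1
--     return "[%s]" % (r * n)
-- ===== SOURCE B (Python) =====
-- def _is_prime(q):
--     if q < 2:
--         return False
--     d = 2
--     while d * d <= q:
--         if q % d == 0: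
--             return False
--         d += 1
--     return True
--
--
-- def int2barbrack(n):
--     if n < 1:
--         return ""
--     # largest prime factor of n by trial division up to sqrt
--     m = n
--     d = 2
--     top = 1
--     while d * d <= m:
--         if m % d == 0:
--             top = d
--             while m % d == 0:
--                 m //= d
--         d += 1
--     if m > 1:
--         top = m
--     # one entry per prime 2..top: the exponent of that prime in n, encoded recursively
--     parts = []
--     for q in range(2, top + 1):
--         if _is_prime(q):
--             e = 0
--             t = n
--             while t % q == 0:
--                 t //= q
--                 e += 1
--             parts.append(int2barbrack(e))
--     return "[" + "|".join(parts) + "]"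
-- ===== Notes on version B (the rewrite author's own statement) =====
-- stated objective: faster
-- what changed: A detects primes with a running factorial-square product reduced mod the loop index (Wilson/Fermat on huge bignums) and scans every index up to the largest prime factor to strip it; B factors n by trial division bounded by the square root, reads off the largest prime factor, and emits one recursively-encoded exponent entry per prime up to it using a square-root-bounded primality test, joining the entries with bars.
import Mathlib
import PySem

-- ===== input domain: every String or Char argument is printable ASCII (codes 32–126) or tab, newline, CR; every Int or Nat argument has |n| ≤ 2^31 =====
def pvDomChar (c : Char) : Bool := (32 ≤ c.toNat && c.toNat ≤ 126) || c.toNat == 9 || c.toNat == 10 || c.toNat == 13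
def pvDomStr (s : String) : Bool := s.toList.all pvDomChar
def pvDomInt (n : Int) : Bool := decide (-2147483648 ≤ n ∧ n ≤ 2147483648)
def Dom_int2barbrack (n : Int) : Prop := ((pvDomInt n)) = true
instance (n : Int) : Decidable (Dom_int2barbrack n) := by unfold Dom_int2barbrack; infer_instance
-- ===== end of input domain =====

-- B replaces A's running factorial-square product (Wilson/Fermat primality on giant bignums)
-- with square-root-bounded trial-division factoring plus an explicit primality test; objective: faster.
-- ===== PORT A =====
-- "|" * k / r * n  (Python str * int; empty for k <= 0)
def pyStrMul (s : String) (k : Int) : String := String.join (List.replicate k.toNat s)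

-- inner loop `while n % i < 1: n //= i; w += 1` (fuel-totalised; fuel n.toNat suffices at every call site)
def divLoopA : Nat → Int → Int → Int → Int × Int
  | 0, n, _, w => (n, w)
  | f+1, n, i, w =>
    if PySem.Int.mod n i < 1 then divLoopA f (PySem.Int.floordiv n i) i (w + 1) else (n, w)

mutual
-- body of int2barbrack (fuel-totalised literal transliteration)
def bbA : Nat → Int → String
  | 0, _ => ""
  | f+1, n => if n < 1 then "" else outerA f n 2 2 ""
-- outer loop `while n > 1: ...` with state (n, p, i, r); on exit returns "[%s]" % (r * n)
def outerA : Nat → Int → Int → Int → String → String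
  | 0, _, _, _, _ => ""
  | f+1, n, p, i, r =>
    if n > 1 then
      let nw := divLoopA n.toNat n i 1
      outerA f nw.1 (p * (i * i * 2)) (i + 1)
        (r ++ pyStrMul "|" (PySem.Int.mod p i) ++ bbA f (nw.2 - 1))
    else "[" ++ pyStrMul r n ++ "]"
end

def int2barbrack (n : Int) : String := bbA (4 * n.toNat + 2) n

-- ===== PORT B =====
-- _is_prime: trial division while d * d <= q (fuel q.toNat suffices)
def isPrimeLoopB : Nat → Int → Int → Bool
  | 0, _, _ => true
  | f+1, q, d =>
    if d * d ≤ q then (if PySem.Int.mod q d == 0 then false else isPrimeLoopB f q (d + 1))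
    else true

def isPrimeB (q : Int) : Bool := if q < 2 then false else isPrimeLoopB q.toNat q 2

-- inner `while m % d == 0: m //= d`
def stripA' : Nat → Int → Int → Int
  | 0, m, _ => m
  | f+1, m, d => if PySem.Int.mod m d == 0 then stripA' f (PySem.Int.floordiv m d) d else m

-- `while d * d <= m: if m % d == 0: top = d; (strip) ; d += 1`  returns (m, top)
def facLoopB : Nat → Int → Int → Int → Int × Int
  | 0, m, _, top => (m, top)
  | f+1, m, d, top =>
    if d * d ≤ m then
      if PySem.Int.mod m d == 0 then facLoopB f (stripA' m.toNat m d) (d + 1) d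
      else facLoopB f m (d + 1) top
    else (m, top)

-- `e = 0; t = n; while t % q == 0: t //= q; e += 1`  returns e
def expLoopB : Nat → Int → Int → Int → Int
  | 0, _, _, e => e
  | f+1, t, q, e => if PySem.Int.mod t q == 0 then expLoopB f (PySem.Int.floordiv t q) q (e + 1) else e

def bbB : Nat → Int → String
  | 0, _ => ""
  | f+1, n =>
    if n < 1 then ""
    else
      let mt := facLoopB n.toNat n 2 1
      let top := if mt.1 > 1 then mt.1 else mt.2
      let parts := ((PySem.List.pyRange 2 (top + 1) 1).filter (fun q => isPrimeB q)).map
        (fun q => bbB f (expLoopB n.toNat n q 0))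
      "[" ++ PySem.Str.join "|" parts ++ "]"

def int2barbrack_alt (n : Int) : String := bbB (n.toNat + 1) n

-- ===== PRECONDITION & SPEC =====
def Spec_int2barbrack (n : Int) (out : String) : Prop := out = int2barbrack_alt n
instance (n : Int) (out : String) : Decidable (Spec_int2barbrack n out) := by unfold Spec_int2barbrack; infer_instance

-- ===== CLAIM (what is proved, stated in full; the proofs are below) =====
def Claim_equal_int2barbrack : Prop := ∀ (n : Int), Dom_int2barbrack n → Spec_int2barbrack n (int2barbrack n)

-- ===== LEMMAS AND PROOFS =====

-- largest prime factor (0 for N ≤ 1); proof-side notion both loop characterisations meet at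
def Lpf (N : ℕ) : ℕ := N.primeFactors.sup id

-- concatenation of a list of strings
def catS : List String → String
  | [] => ""
  | x :: l => x ++ catS l

-- canonical entry of the barbrack body at position q (separator bar included), and the body
def entryE (N q : ℕ) : String :=
  if q.Prime then (if q = 2 then "" else "|") ++ int2barbrack_alt ((N.factorization q : ℕ) : ℤ) else ""

def bodyE (N : ℕ) (l : List ℕ) : String := catS (l.map (entryE N))

-- canonical value of both programs
def canonE (N : ℕ) : String := if N = 0 then "" else "[" ++ bodyE N (List.range' 2 (Lpf N - 1)) ++ "]"

-- A's running product p at the top of the iteration for i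
def Pint (i : ℕ) : ℤ := 2 ^ (i - 1) * ((i - 1).factorial : ℤ) ^ 2

-- ---- small string facts ----
theorem pyStrMul_nonpos (s : String) (k : Int) (h : k ≤ 0) : pyStrMul s k = "" := by
  simp [pyStrMul, Int.toNat_of_nonpos h, String.join]

theorem pyStrMul_one (s : String) : pyStrMul s 1 = s := by
  simp [pyStrMul, String.join]

theorem catS_append (l1 l2 : List String) : catS (l1 ++ l2) = catS l1 ++ catS l2 := by
  induction l1 with
  | nil => simp [catS]
  | cons x l ih => simp [catS, ih, String.append_assoc]

theorem join_cons (x : String) (l : List String) :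
    PySem.Str.join "|" (x :: l) = x ++ catS (l.map (fun y => "|" ++ y)) := by
  induction l generalizing x with
  | nil =>
    rw [← String.toList_inj]
    simp [PySem.Str.toList_join, PySem.Chars.join_singleton, catS]
  | cons y l ih =>
    rw [← String.toList_inj, PySem.Str.toList_join]
    simp only [List.map_cons, PySem.Chars.join_cons_cons]
    have h2 : (PySem.Str.join "|" (y :: l)).toList
        = PySem.Chars.join "|".toList (y.toList :: List.map String.toList l) := by
      rw [PySem.Str.toList_join]; simp
    rw [← h2, ih y]
    simp [catS, String.toList_append, String.append_assoc]

theorem join_nil' : PySem.Str.join "|" ([] : List String) = "" := by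
  rw [← String.toList_inj]
  simp [PySem.Str.toList_join, PySem.Chars.join_nil]

-- ---- Lpf facts ----
theorem Lpf_mem {N : ℕ} (h : 2 ≤ N) : Lpf N ∈ N.primeFactors := by
  unfold Lpf
  have hne : N.primeFactors.Nonempty := Nat.nonempty_primeFactors.2 h
  rw [← Finset.sup'_eq_sup hne]
  exact Finset.sup'_mem (↑N.primeFactors : Set ℕ)
    (fun x hx y hy => by rcases max_choice x y with h | h <;> simp [h, hx, hy]) _ hne id
    (fun b hb => hb)

theorem Lpf_one : Lpf 1 = 0 := by simp [Lpf]

theorem Lpf_prime_pow {p e : ℕ} (hp : p.Prime) (he : e ≠ 0) : Lpf (p ^ e) = p := by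
  rw [Lpf, Nat.primeFactors_prime_pow he hp, Finset.sup_singleton, id]

theorem Lpf_mul_pow {p e M : ℕ} (hp : p.Prime) (he : e ≠ 0) (hM : 2 ≤ M)
    (hq : ∀ q ∈ M.primeFactors, p < q) : Lpf (p ^ e * M) = Lpf M := by
  have h1 : (p ^ e * M).primeFactors = {p} ∪ M.primeFactors := by
    rw [Nat.primeFactors_mul (pow_ne_zero e hp.pos.ne') (by omega),
      Nat.primeFactors_prime_pow he hp]
  rw [Lpf, h1, Finset.sup_union, Finset.sup_singleton]
  have h2 : p ≤ Lpf M := by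
    obtain ⟨q, hq1⟩ := Nat.nonempty_primeFactors.2 hM
    exact le_trans (le_of_lt (hq q hq1)) (Finset.le_sup (f := id) hq1)
  exact sup_eq_right.2 h2

theorem entry_transfer {p e M q : ℕ} (hp : p.Prime) (hM : M ≠ 0) (hq : q ≠ p) :
    entryE (p ^ e * M) q = entryE M q := by
  have h : (p ^ e * M).factorization q = M.factorization q := by
    rw [Nat.factorization_mul (pow_ne_zero e hp.pos.ne') hM, Finsupp.add_apply,
      hp.factorization_pow, Finsupp.single_apply, if_neg (fun h => hq h.symm), zero_add]
  rw [entryE, entryE, h]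

-- ---- division loops ----
theorem divLoopA_no {i N : ℕ} (hi : 0 < i) (h : ¬ (i ∣ N)) :
    ∀ (f : ℕ) (w : Int), divLoopA f (N : ℤ) (i : ℤ) w = ((N : ℤ), w) := by
  intro f w
  cases f with
  | zero => rfl
  | succ f =>
    rw [divLoopA, if_neg]
    have h0 : PySem.Int.mod (N : ℤ) (i : ℤ) ≠ 0 := fun hc => by
      rw [PySem.Int.mod_eq_zero_iff_dvd] at hc
      exact h (by exact_mod_cast hc)
    have h1 : 0 ≤ PySem.Int.mod (N : ℤ) (i : ℤ) := PySem.Int.mod_nonneg _ (by exact_mod_cast hi)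
    omega

theorem divLoopA_pow {i M : ℕ} (hi : 2 ≤ i) (h : ¬ (i ∣ M)) :
    ∀ (e f : ℕ) (w : Int), e ≤ f →
      divLoopA f ((i ^ e * M : ℕ) : ℤ) (i : ℤ) w = ((M : ℤ), w + e) := by
  intro e
  induction e with
  | zero => intro f w _; simpa using divLoopA_no (by omega) h f w
  | succ e ih =>
    intro f w hf
    obtain ⟨f, rfl⟩ : ∃ g, f = g + 1 := ⟨f - 1, by omega⟩
    have hdvd : i ∣ i ^ (e+1) * M := Dvd.dvd.mul_right (dvd_pow_self i (by omega)) M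
    have hlt : PySem.Int.mod ((i ^ (e+1) * M : ℕ) : ℤ) (i : ℤ) < 1 := by
      have : PySem.Int.mod ((i ^ (e+1) * M : ℕ) : ℤ) (i : ℤ) = 0 := by
        rw [PySem.Int.mod_eq_zero_iff_dvd]; exact_mod_cast hdvd
      omega
    rw [divLoopA, if_pos hlt, PySem.Int.floordiv_natCast]
    have hdiv : (i ^ (e+1) * M) / i = i ^ e * M := by
      rw [pow_succ, mul_comm (i^e) i, mul_assoc, Nat.mul_div_cancel_left _ (by omega)]
    rw [hdiv, ih f (w+1) (by omega), Prod.mk.injEq]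
    refine ⟨rfl, by push_cast; ring⟩

theorem stripA'_pow {d M : ℕ} (hd : 2 ≤ d) (h : ¬ (d ∣ M)) :
    ∀ (e f : ℕ), e ≤ f → stripA' f ((d ^ e * M : ℕ) : ℤ) (d : ℤ) = (M : ℤ) := by
  intro e
  induction e with
  | zero =>
    intro f _
    cases f with
    | zero => simp [stripA']
    | succ f =>
      have hb : ¬ ((PySem.Int.mod ((d ^ 0 * M : ℕ) : ℤ) (d:ℤ) == 0) = true) := by
        rw [beq_iff_eq, PySem.Int.mod_eq_zero_iff_dvd]
        simpa using (fun hc => h (by exact_mod_cast hc))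
      rw [stripA', if_neg hb]
      simp
  | succ e ih =>
    intro f hf
    obtain ⟨f, rfl⟩ : ∃ g, f = g + 1 := ⟨f - 1, by omega⟩
    have hdvd : d ∣ d ^ (e+1) * M := Dvd.dvd.mul_right (dvd_pow_self d (by omega)) M
    have hb : (PySem.Int.mod ((d ^ (e+1) * M : ℕ) : ℤ) (d:ℤ) == 0) = true := by
      rw [beq_iff_eq, PySem.Int.mod_eq_zero_iff_dvd]; exact_mod_cast hdvd
    rw [stripA', if_pos hb, PySem.Int.floordiv_natCast]
    have hdiv : (d ^ (e+1) * M) / d = d ^ e * M := by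
      rw [pow_succ, mul_comm (d^e) d, mul_assoc, Nat.mul_div_cancel_left _ (by omega)]
    rw [hdiv, ih f (by omega)]

theorem expLoopB_pow {q M : ℕ} (hq : 2 ≤ q) (h : ¬ (q ∣ M)) :
    ∀ (e f : ℕ) (c : Int), e ≤ f →
      expLoopB f ((q ^ e * M : ℕ) : ℤ) (q : ℤ) c = c + e := by
  intro e
  induction e with
  | zero =>
    intro f c _
    cases f with
    | zero => simp [expLoopB]
    | succ f =>
      have hb : ¬ ((PySem.Int.mod ((q ^ 0 * M : ℕ) : ℤ) (q:ℤ) == 0) = true) := by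
        rw [beq_iff_eq, PySem.Int.mod_eq_zero_iff_dvd]
        simpa using (fun hc => h (by exact_mod_cast hc))
      rw [expLoopB, if_neg hb]
      simp
  | succ e ih =>
    intro f c hf
    obtain ⟨f, rfl⟩ : ∃ g, f = g + 1 := ⟨f - 1, by omega⟩
    have hdvd : q ∣ q ^ (e+1) * M := Dvd.dvd.mul_right (dvd_pow_self q (by omega)) M
    have hb : (PySem.Int.mod ((q ^ (e+1) * M : ℕ) : ℤ) (q:ℤ) == 0) = true := by
      rw [beq_iff_eq, PySem.Int.mod_eq_zero_iff_dvd]; exact_mod_cast hdvd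
    rw [expLoopB, if_pos hb, PySem.Int.floordiv_natCast]
    have hdiv : (q ^ (e+1) * M) / q = q ^ e * M := by
      rw [pow_succ, mul_comm (q^e) q, mul_assoc, Nat.mul_div_cancel_left _ (by omega)]
    rw [hdiv, ih f (c+1) (by omega)]
    push_cast
    ring

theorem expLoopB_fact {q N : ℕ} (hq : q.Prime) (hN : 0 < N) :
    ∀ f : ℕ, N ≤ f → expLoopB f (N : ℤ) (q : ℤ) 0 = ((N.factorization q : ℕ) : ℤ) := by
  intro f hf
  set e := N.factorization q with he
  set M := N / q ^ e with hM
  have hmM : q ^ e * M = N := Nat.ordProj_mul_ordCompl_eq_self N q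
  have hndvd : ¬ q ∣ M := Nat.not_dvd_ordCompl hq (by omega)
  have hle : e ≤ f := le_trans (le_of_lt (Nat.factorization_lt q (by omega))) hf
  calc expLoopB f (N:ℤ) (q:ℤ) 0 = expLoopB f ((q ^ e * M : ℕ) : ℤ) (q:ℤ) 0 := by rw [hmM]
    _ = 0 + e := expLoopB_pow hq.two_le hndvd e f 0 hle
    _ = ((e:ℕ):ℤ) := by ring

-- ---- Wilson / Fermat: what A's p % i is ----
theorem Pint_two : Pint 2 = 2 := by norm_num [Pint, Nat.factorial]

theorem Pint_succ {i : ℕ} (hi : 1 ≤ i) : Pint (i + 1) = Pint i * ((i : ℤ) * (i : ℤ) * 2) := by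
  obtain ⟨j, rfl⟩ : ∃ j, i = j + 1 := ⟨i - 1, by omega⟩
  simp only [Pint, Nat.add_sub_cancel, Nat.factorial_succ]
  push_cast
  ring

theorem Pnat_mod {i : ℕ} (hi : 2 ≤ i) :
    (2 ^ (i - 1) * (i - 1).factorial ^ 2) % i = if i.Prime ∧ i ≠ 2 then 1 else 0 := by
  by_cases hp : i.Prime
  · by_cases h2 : i = 2
    · subst h2; decide
    · rw [if_pos ⟨hp, h2⟩]
      haveI : Fact i.Prime := ⟨hp⟩
      have hi3 : 3 ≤ i := by
        rcases Nat.lt_or_ge i 3 with h | h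
        · interval_cases i
          · exact absurd rfl h2
        · exact h
      have h2ne : (2 : ZMod i) ≠ 0 := by
        intro hc
        have hc' : ((2 : ℕ) : ZMod i) = ((0 : ℕ) : ZMod i) := by push_cast; exact_mod_cast hc
        have := (ZMod.natCast_eq_natCast_iff' 2 0 i).1 hc'
        rw [Nat.mod_eq_of_lt (by omega)] at this
        simp at this
      have hcast : ((2 ^ (i - 1) * (i - 1).factorial ^ 2 : ℕ) : ZMod i) = ((1 : ℕ) : ZMod i) := by
        push_cast
        rw [ZMod.wilsons_lemma, ZMod.pow_card_sub_one_eq_one h2ne]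
        ring
      have hmod := (ZMod.natCast_eq_natCast_iff' _ 1 i).1 hcast
      rw [Nat.one_mod_eq_one.mpr (by omega)] at hmod
      exact hmod
  · rw [if_neg (by tauto)]
    have ha := Nat.minFac_dvd i
    set a := i.minFac with hadef
    obtain ⟨b, hab⟩ := ha
    have hia : a ≠ i := fun hc => hp (by rw [← hc]; exact Nat.minFac_prime (by omega))
    have ha2 : 2 ≤ a := (Nat.minFac_prime (by omega)).two_le
    have hb2 : 2 ≤ b := by
      rcases Nat.lt_or_ge b 2 with hb | hb
      · interval_cases b <;> omega
      · exact hb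
    have haL : a ≤ i - 1 := by
      have : a < i := lt_of_le_of_ne (Nat.minFac_le (by omega)) hia
      omega
    have hbL : b ≤ i - 1 := by
      have h1 : 2 * b ≤ a * b := Nat.mul_le_mul_right b ha2
      omega
    have hdvd2 : a * b ∣ (i-1).factorial * (i-1).factorial :=
      mul_dvd_mul (Nat.dvd_factorial (by omega) haL) (Nat.dvd_factorial (by omega) hbL)
    rw [← hab] at hdvd2
    have hdvd : i ∣ 2 ^ (i - 1) * (i - 1).factorial ^ 2 := by
      rw [pow_two]
      exact Dvd.dvd.mul_left hdvd2 _
    exact Nat.mod_eq_zero_of_dvd hdvd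

theorem Pint_mod {i : ℕ} (hi : 2 ≤ i) :
    PySem.Int.mod (Pint i) (i : ℤ) = if i.Prime ∧ i ≠ 2 then 1 else 0 := by
  have hP : Pint i = ((2 ^ (i - 1) * (i - 1).factorial ^ 2 : ℕ) : ℤ) := by
    unfold Pint; push_cast; ring
  rw [hP, PySem.Int.mod_natCast, Pnat_mod hi]
  split_ifs <;> simp

-- ---- primality test of B ----
theorem isPrimeLoopB_eq {q : ℕ} (hq : 2 ≤ q) :
    ∀ (f d : ℕ), 2 ≤ d → q + 1 ≤ f + d → (∀ m, 2 ≤ m → m < d → ¬ (m ∣ q)) →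
      isPrimeLoopB f (q : ℤ) (d : ℤ) = decide q.Prime := by
  intro f
  induction f with
  | zero =>
    intro d hd hf hbelow
    have hprime : q.Prime := by
      rw [Nat.prime_def_lt]
      refine ⟨hq, fun m hm hdvd => ?_⟩
      rcases Nat.lt_or_ge m 2 with h | h
      · interval_cases m
        · exact absurd (Nat.eq_zero_of_zero_dvd hdvd) (by omega)
        · rfl
      · exact absurd hdvd (hbelow m h (by omega))
    simp [isPrimeLoopB, hprime]
  | succ f ih =>
    intro d hd hf hbelow
    rw [isPrimeLoopB]
    by_cases hdd : (d : ℤ) * d ≤ (q : ℤ)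
    · rw [if_pos hdd]
      have hddn : d * d ≤ q := by exact_mod_cast hdd
      by_cases hdvd : d ∣ q
      · have hb : (PySem.Int.mod (q:ℤ) (d:ℤ) == 0) = true := by
          rw [beq_iff_eq, PySem.Int.mod_eq_zero_iff_dvd]
          exact_mod_cast hdvd
        rw [if_pos hb]
        have hnp : ¬ q.Prime := by
          intro hp
          rcases (Nat.Prime.eq_one_or_self_of_dvd hp d hdvd) with h | h
          · omega
          · nlinarith
        simp [hnp]
      · have hb : ¬ ((PySem.Int.mod (q:ℤ) (d:ℤ) == 0) = true) := by
          rw [beq_iff_eq, PySem.Int.mod_eq_zero_iff_dvd]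
          simpa using (fun hc => hdvd (by exact_mod_cast hc))
        rw [if_neg hb]
        have hcast : ((d : ℕ) : ℤ) + 1 = (((d + 1 : ℕ)) : ℤ) := by push_cast; ring
        rw [hcast]
        exact ih (d+1) (by omega) (by omega) (fun m hm hmd => by
          rcases Nat.lt_or_ge m d with h | h
          · exact hbelow m hm h
          · have : m = d := by omega
            subst this; exact hdvd)
    · rw [if_neg hdd]
      have hprime : q.Prime := by
        rw [Nat.prime_def_le_sqrt]
        refine ⟨hq, fun m hm hms => ?_⟩
        have h1 : m * m ≤ q := Nat.le_sqrt.1 hms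
        have hmd : m < d := by nlinarith [hdd, h1]
        exact hbelow m hm hmd
      simp [hprime]

theorem isPrimeB_eq (q : ℕ) : isPrimeB (q : ℤ) = decide q.Prime := by
  by_cases h : q < 2
  · have hnp : ¬ q.Prime := fun hp => by have := hp.two_le; omega
    interval_cases q <;> simp [isPrimeB, hnp]
  · rw [isPrimeB, if_neg (by exact_mod_cast h), Int.toNat_natCast]
    exact isPrimeLoopB_eq (by omega) q 2 (by omega) (by omega) (fun m hm hmd => by omega)

-- ---- B's factor loop: the combined top is the largest prime factor ----
theorem facLoopB_one {d : ℕ} (hd : 2 ≤ d) (top : Int) :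
    ∀ f, facLoopB f 1 (d : ℤ) top = (1, top) := by
  intro f
  cases f with
  | zero => rfl
  | succ f =>
    rw [facLoopB, if_neg]
    have : (2:ℤ) ≤ (d:ℤ) := by exact_mod_cast hd
    nlinarith

theorem facLoop_top :
    ∀ (f m d : ℕ) (top : Int), 2 ≤ d → 2 ≤ m → (∀ q ∈ m.primeFactors, d ≤ q) →
      m + 1 ≤ f + d →
      (if (facLoopB f (m : ℤ) (d : ℤ) top).1 > 1 then (facLoopB f (m : ℤ) (d : ℤ) top).1
       else (facLoopB f (m : ℤ) (d : ℤ) top).2) = (Lpf m : ℤ) := by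
  intro f
  induction f with
  | zero =>
    intro m d top hd hm hq hf
    exfalso
    have hmem : m.minFac ∈ m.primeFactors := by
      rw [Nat.mem_primeFactors]
      exact ⟨Nat.minFac_prime (by omega), Nat.minFac_dvd m, by omega⟩
    have h1 := hq _ hmem
    have h2 := Nat.minFac_le (show 0 < m by omega)
    omega
  | succ f ih =>
    intro m d top hd hm hq hf
    by_cases hdd : (d:ℤ) * d ≤ (m:ℤ)
    · have hddn : d * d ≤ m := by exact_mod_cast hdd
      rw [facLoopB, if_pos hdd]
      by_cases hdvd : d ∣ m
      · have hdp : d.Prime := by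
          have hmf := Nat.minFac_prime (show d ≠ 1 by omega)
          have hmem : d.minFac ∈ m.primeFactors := by
            rw [Nat.mem_primeFactors]
            exact ⟨hmf, (Nat.minFac_dvd d).trans hdvd, by omega⟩
          have h1 := hq _ hmem
          have h2 := Nat.minFac_le (show 0 < d by omega)
          have h3 : d.minFac = d := by omega
          rw [← h3]; exact hmf
        have hb : (PySem.Int.mod (m:ℤ) (d:ℤ) == 0) = true := by
          rw [beq_iff_eq, PySem.Int.mod_eq_zero_iff_dvd]; exact_mod_cast hdvd
        rw [if_pos hb]
        set e := m.factorization d with he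
        set M := m / d ^ e with hM
        have hmM : d ^ e * M = m := Nat.ordProj_mul_ordCompl_eq_self m d
        have hMpos : 0 < M := Nat.ordCompl_pos d (by omega)
        have hndvd : ¬ d ∣ M := Nat.not_dvd_ordCompl hdp (by omega)
        have he1 : 1 ≤ e := by
          rcases Nat.eq_zero_or_pos e with h0 | h1
          · exfalso
            rw [h0] at hmM
            simp at hmM
            exact hndvd (hmM ▸ hdvd)
          · exact h1
        have hestrip : stripA' ((m:ℤ)).toNat (m:ℤ) (d:ℤ) = (M:ℤ) := by
          rw [Int.toNat_natCast]
          have hle : e ≤ m := le_of_lt (Nat.factorization_lt d (by omega))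
          calc stripA' m (m:ℤ) (d:ℤ) = stripA' m ((d ^ e * M : ℕ) : ℤ) (d:ℤ) := by rw [hmM]
            _ = (M:ℤ) := stripA'_pow hd hndvd e m hle
        rw [hestrip]
        have hqM : ∀ q ∈ M.primeFactors, d + 1 ≤ q := by
          intro q hqm
          rw [Nat.mem_primeFactors] at hqm
          have hqm' : q ∈ m.primeFactors := by
            rw [Nat.mem_primeFactors]
            exact ⟨hqm.1, hqm.2.1.trans (Dvd.intro_left _ hmM), by omega⟩
          have h1 := hq _ hqm'
          have h2 : q ≠ d := fun hc => hndvd (hc ▸ hqm.2.1)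
          omega
        have hcast : ((d : ℕ) : ℤ) + 1 = (((d + 1 : ℕ)) : ℤ) := by push_cast; ring
        have hde : 2 ≤ d ^ e := by
          calc 2 = 2 ^ 1 := rfl
          _ ≤ 2 ^ e := Nat.pow_le_pow_right (by omega) he1
          _ ≤ d ^ e := Nat.pow_le_pow_left hd e
        have hM2 : 2 * M ≤ m := by
          calc 2 * M ≤ d ^ e * M := Nat.mul_le_mul_right M hde
          _ = m := hmM
        rcases Nat.lt_or_ge M 2 with hM1 | hM2'
        · have hMeq : M = 1 := by omega
          rw [hMeq] at hmM
          rw [hMeq, hcast, show ((1:ℕ):ℤ) = 1 from rfl,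
            facLoopB_one (show 2 ≤ d + 1 by omega) ((d:ℕ):ℤ) f]
          have hLpf : Lpf m = d := by
            rw [← hmM]
            simpa using Lpf_prime_pow hdp (by omega)
          rw [hLpf]
          norm_num
        · rw [hcast]
          rw [ih M (d+1) (d:ℤ) (by omega) hM2' hqM (by omega)]
          have hLpf : Lpf m = Lpf M := by
            rw [← hmM]
            exact Lpf_mul_pow hdp (by omega) hM2' (fun q hqm => by
              have := hqM q hqm; omega)
          rw [hLpf]
      · have hb : ¬ ((PySem.Int.mod (m:ℤ) (d:ℤ) == 0) = true) := by
          rw [beq_iff_eq, PySem.Int.mod_eq_zero_iff_dvd]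
          simpa using (fun hc => hdvd (by exact_mod_cast hc))
        rw [if_neg hb]
        have hcast : ((d : ℕ) : ℤ) + 1 = (((d + 1 : ℕ)) : ℤ) := by push_cast; ring
        rw [hcast]
        exact ih m (d+1) top (by omega) hm (fun q hqm => by
          have h1 := hq q hqm
          have h2 : q ≠ d := fun hc => by
            rw [Nat.mem_primeFactors] at hqm
            exact hdvd (hc ▸ hqm.2.1)
          omega) (by omega)
    · rw [facLoopB, if_neg hdd]
      have hddn : ¬ (d * d ≤ m) := fun hc => hdd (by exact_mod_cast hc)
      have hmp : m.Prime := by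
        by_contra hnp
        have hsq := Nat.minFac_sq_le_self (show 0 < m by omega) hnp
        have hmem : m.minFac ∈ m.primeFactors := by
          rw [Nat.mem_primeFactors]
          exact ⟨Nat.minFac_prime (by omega), Nat.minFac_dvd m, by omega⟩
        have h1 := hq _ hmem
        nlinarith [hsq, h1]
      have hLpf : Lpf m = m := by
        rw [Lpf, hmp.primeFactors, Finset.sup_singleton, id]
      rw [hLpf, if_pos (show ((m:ℤ), top).1 > 1 from by
        change (1:ℤ) < (m:ℤ); exact_mod_cast hm)]

-- ---- B = canonical ----
theorem filter_head_two (k : ℕ) (hk : 1 ≤ k) :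
    ∃ rest, (List.range' 2 k).filter (fun q => decide q.Prime) = 2 :: rest := by
  obtain ⟨k', rfl⟩ : ∃ k', k = k' + 1 := ⟨k - 1, by omega⟩
  rw [List.range'_succ, List.filter_cons]
  simp [Nat.prime_two]

theorem join_entries (N : ℕ) :
    ∀ k, PySem.Str.join "|" (((List.range' 2 k).filter (fun q => decide q.Prime)).map
        (fun q => int2barbrack_alt ((N.factorization q : ℕ) : ℤ))) =
      bodyE N (List.range' 2 k) := by
  intro k
  induction k with
  | zero => simp [bodyE, catS, join_nil']
  | succ k ih =>
    have hcon : List.range' 2 (k+1) = List.range' 2 k ++ [2 + k] := by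
      simpa using (List.range'_concat (s := 2) (n := k) (step := 1))
    rw [hcon, List.filter_append, List.map_append, bodyE, List.map_append, catS_append]
    by_cases hp : (2 + k).Prime
    · rcases Nat.eq_zero_or_pos k with rfl | hk
      · simp only [List.range'_zero, List.filter_nil, List.map_nil, List.nil_append]
        rw [List.filter_cons]
        simp only [hp, decide_true, if_pos]
        rw [← String.toList_inj]
        simp [PySem.Str.toList_join, PySem.Chars.join_singleton, catS, entryE, hp]
      · obtain ⟨rest, hrest⟩ := filter_head_two k hk
        rw [hrest] at ih ⊢
        have hx : (List.filter (fun q => decide q.Prime) [2 + k]) = [2 + k] := by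
          simp [hp]
        rw [hx]
        simp only [List.map_cons, List.map_nil]
        rw [List.cons_append, join_cons, List.map_append, catS_append]
        rw [List.map_cons, join_cons] at ih
        rw [← String.append_assoc, ih]
        simp [bodyE, entryE, hp, catS, String.append_empty, show k ≠ 0 from by omega]
    · have hx : (List.filter (fun q => decide q.Prime) [2 + k]) = [] := by simp [hp]
      rw [hx, List.map_nil]
      simp only [List.map_cons, List.map_nil, catS, entryE, hp, if_false]
      rw [List.append_nil, ih, bodyE]
      simp [String.append_empty]

theorem pyRange_cast (L : ℕ) :
    PySem.List.pyRange 2 ((L:ℤ) + 1) 1 = (List.range' 2 (L - 1)).map (fun q : ℕ => (q:ℤ)) := by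
  rw [PySem.List.pyRange_one, List.range'_eq_map_range, List.map_map]
  have h : ((L:ℤ) + 1 - 2).toNat = L - 1 := by omega
  rw [h]
  exact List.map_congr_left (fun k _ => by simp only [Function.comp_apply]; push_cast; ring)

theorem alt_unfold (e : ℕ) : int2barbrack_alt (e : ℤ) = bbB (e + 1) (e : ℤ) := by
  rw [int2barbrack_alt, Int.toNat_natCast]

theorem bbB_eq : ∀ (f N : ℕ), N + 1 ≤ f → bbB f (N : ℤ) = canonE N := by
  intro f
  induction f using Nat.strong_induction_on with
  | _ f ih =>
    intro N hf
    obtain ⟨g, rfl⟩ : ∃ g, f = g + 1 := ⟨f - 1, by omega⟩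
    rcases Nat.eq_zero_or_pos N with rfl | hN
    · rw [show ((0:ℕ):ℤ) = 0 from rfl, bbB, if_pos (by norm_num)]
      simp [canonE]
    have hn1 : ¬ ((N:ℤ) < 1) := by exact_mod_cast Nat.not_lt.2 hN
    rw [bbB, if_neg hn1]
    simp only [Int.toNat_natCast]
    rcases Nat.lt_or_ge N 2 with hN1 | hN2
    · have hNeq : N = 1 := by omega
      subst hNeq
      have h1 := facLoopB_one (d := 2) (le_refl 2) 1 1
      simp only [Nat.cast_ofNat] at h1
      rw [show ((1:ℕ):ℤ) = 1 from rfl, h1]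
      norm_num
      rw [join_nil']
      simp [canonE, Lpf_one, bodyE, catS]
    · -- N ≥ 2 : the computed top is the largest prime factor
      have htop := facLoop_top N N 2 1 (le_refl 2) hN2
        (fun q hq => ((Nat.mem_primeFactors.1 hq).1.two_le))
        (by omega)
      simp only [Nat.cast_ofNat] at htop
      rw [htop]
      rw [pyRange_cast (Lpf N)]
      rw [List.filter_map, List.map_map]
      have hpred : ((fun q => isPrimeB q) ∘ (fun q : ℕ => (q:ℤ))) = (fun q : ℕ => decide q.Prime) := by
        funext q
        exact isPrimeB_eq q
      rw [hpred]
      set L := Lpf N with hL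
      have hmap : ∀ q ∈ (List.range' 2 (L - 1)).filter (fun q : ℕ => decide q.Prime),
          ((fun qZ => bbB g (expLoopB N (N:ℤ) qZ 0)) ∘ (fun q : ℕ => (q:ℤ))) q
            = int2barbrack_alt ((N.factorization q : ℕ) : ℤ) := by
        intro q hq
        have hqp : q.Prime := by
          have := (List.mem_filter.1 hq).2
          simpa using this
        have hexp : expLoopB N (N:ℤ) (q:ℤ) 0 = ((N.factorization q : ℕ) : ℤ) :=
          expLoopB_fact hqp (by omega) N (le_refl N)
        have hfact : N.factorization q < N := Nat.factorization_lt q (by omega)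
        simp only [Function.comp]
        rw [hexp, alt_unfold]
        rw [ih g (by omega) (N.factorization q) (by omega),
          ih (N.factorization q + 1) (by omega) (N.factorization q) (le_refl _)]
      rw [List.map_congr_left hmap, join_entries N (L - 1)]
      rw [canonE, if_neg (by omega)]

theorem alt_eq_canon (N : ℕ) : int2barbrack_alt (N : ℤ) = canonE N := by
  rw [alt_unfold]
  exact bbB_eq (N + 1) N (le_refl _)

-- ---- A = canonical ----
theorem bbA_zero : ∀ f : ℕ, 1 ≤ f → bbA f 0 = "" := by
  intro f hf
  obtain ⟨g, rfl⟩ : ∃ g, f = g + 1 := ⟨f - 1, by omega⟩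
  rw [bbA, if_pos (by norm_num)]

def PBbA (f : ℕ) : Prop := ∀ N : ℕ, 4 * N + 2 ≤ f → bbA f (N : ℤ) = int2barbrack_alt (N : ℤ)

def POutA (f : ℕ) : Prop :=
  ∀ (N i : ℕ) (r : String), 1 ≤ N → 2 ≤ i → (∀ q ∈ N.primeFactors, i ≤ q) →
    3 * N + (N + 2 - i) ≤ f →
    outerA f (N : ℤ) (Pint i) (i : ℤ) r =
      "[" ++ r ++ bodyE N (List.range' i (Lpf N + 1 - i)) ++ "]"

theorem fuel_pow (e : ℕ) (he : 1 ≤ e) : 4 * e + 2 ≤ 3 * 2 ^ e := by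
  induction e with
  | zero => omega
  | succ e ih =>
    rcases Nat.eq_zero_or_pos e with rfl | h1
    · norm_num
    · have h2 : 3 * 2 ^ e ≤ 3 * 2 ^ (e+1) := by
        have : (2:ℕ) ^ e ≤ 2 ^ (e+1) := Nat.pow_le_pow_right (by omega) (by omega)
        omega
      have := ih h1
      have h3 : 3 * 2 ^ (e+1) = 2 * (3 * 2 ^ e) := by ring
      omega

theorem jointA : ∀ f, PBbA f ∧ POutA f := by
  intro f
  induction f using Nat.strong_induction_on with
  | _ f ih =>
    constructor
    · -- bbA agrees with B once the fuel covers the input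
      intro N hf
      obtain ⟨g, rfl⟩ : ∃ g, f = g + 1 := ⟨f - 1, by omega⟩
      rcases Nat.eq_zero_or_pos N with rfl | hN
      · rw [show ((0:ℕ):ℤ) = 0 from rfl, bbA, if_pos (by norm_num)]
        decide
      · have hn1 : ¬ ((N:ℤ) < 1) := by exact_mod_cast Nat.not_lt.2 hN
        rw [bbA, if_neg hn1]
        have hout := (ih g (by omega)).2 N 2 "" hN (le_refl 2)
          (fun q hq => ((Nat.mem_primeFactors.1 hq).1.two_le)) (by omega)
        simp only [Pint_two, Nat.cast_ofNat] at hout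
        rw [hout, alt_eq_canon, canonE, if_neg (by omega)]
        have hc : Lpf N + 1 - 2 = Lpf N - 1 := by omega
        rw [hc, String.append_empty]
    · -- the outer loop produces the canonical body from position i on
      cases f with
      | zero =>
        intro N i r hN hi hinv hfuel
        exact absurd hfuel (by omega)
      | succ g =>
        intro N i r hN hi hinv hfuel
        rcases Nat.lt_or_ge N 2 with hN1 | hN2
        · have hNeq : N = 1 := by omega
          subst hNeq
          rw [outerA, if_neg (by norm_num)]
          rw [show ((1:ℕ):ℤ) = 1 from rfl, pyStrMul_one]
          rw [Lpf_one, show 0 + 1 - i = 0 from by omega]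
          simp [bodyE, catS, String.append_empty]
        · -- N ≥ 2, the loop iterates
          have hiN : i ≤ N := by
            have hmem : N.minFac ∈ N.primeFactors := by
              rw [Nat.mem_primeFactors]
              exact ⟨Nat.minFac_prime (by omega), Nat.minFac_dvd N, by omega⟩
            have h1 := hinv _ hmem
            have h2 := Nat.minFac_le (show 0 < N by omega)
            omega
          have hgN : 3 * N + 1 ≤ g := by omega
          have hg1 : 1 ≤ g := by omega
          have hLge : i ≤ Lpf N := hinv _ (Lpf_mem hN2)
          have hcnt : Lpf N + 1 - i = (Lpf N - i) + 1 := by omega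
          have hn1 : ((1:ℤ) < (N:ℤ)) := by exact_mod_cast hN2
          rw [outerA, if_pos hn1]
          simp only [Int.toNat_natCast]
          by_cases hdvd : i ∣ N
          · -- i is prime here; strip all factors i
            have hip : i.Prime := by
              have hmf := Nat.minFac_prime (show i ≠ 1 by omega)
              have hmem : i.minFac ∈ N.primeFactors := by
                rw [Nat.mem_primeFactors]
                exact ⟨hmf, (Nat.minFac_dvd i).trans hdvd, by omega⟩
              have h1 := hinv _ hmem
              have h2 := Nat.minFac_le (show 0 < i by omega)
              have h3 : i.minFac = i := by omega
              rw [← h3]; exact hmf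
            set e := N.factorization i with he
            set M := N / i ^ e with hM
            have hmM : i ^ e * M = N := Nat.ordProj_mul_ordCompl_eq_self N i
            have hMpos : 0 < M := Nat.ordCompl_pos i (by omega)
            have hndvd : ¬ i ∣ M := Nat.not_dvd_ordCompl hip (by omega)
            have he1 : 1 ≤ e := by
              rcases Nat.eq_zero_or_pos e with h0 | h1
              · exfalso
                rw [h0] at hmM
                simp at hmM
                exact hndvd (hmM ▸ hdvd)
              · exact h1
            have heN : e ≤ N := le_of_lt (Nat.factorization_lt i (by omega))
            have hdivA : divLoopA N (N:ℤ) (i:ℤ) 1 = ((M:ℤ), 1 + (e:ℤ)) := by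
              calc divLoopA N (N:ℤ) (i:ℤ) 1
                  = divLoopA N ((i ^ e * M : ℕ) : ℤ) (i:ℤ) 1 := by rw [hmM]
                _ = ((M:ℤ), 1 + (e:ℤ)) := divLoopA_pow hip.two_le hndvd e N 1 heN
            rw [hdivA]
            simp only []
            have hw : (1 + (e:ℤ)) - 1 = ((e:ℕ):ℤ) := by ring
            rw [hw]
            -- fuel for the recursive encode of the exponent
            have h2e : 2 ^ e ≤ N := by
              calc 2 ^ e ≤ i ^ e := Nat.pow_le_pow_left hip.two_le e
                _ ≤ N := Nat.le_of_dvd (by omega) ⟨M, hmM.symm⟩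
            have hbbfuel : 4 * e + 2 ≤ g := by
              have := fuel_pow e he1
              omega
            have hbb : bbA g ((e:ℕ):ℤ) = int2barbrack_alt ((e:ℕ):ℤ) :=
              (ih g (by omega)).1 e hbbfuel
            rw [hbb]
            -- the recursive outer call
            have hde : 2 ≤ i ^ e := by
              calc 2 = 2 ^ 1 := rfl
              _ ≤ 2 ^ e := Nat.pow_le_pow_right (by omega) he1
              _ ≤ i ^ e := Nat.pow_le_pow_left hip.two_le e
            have hM2 : 2 * M ≤ N := by
              calc 2 * M ≤ i ^ e * M := Nat.mul_le_mul_right M hde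
              _ = N := hmM
            have hqM : ∀ q ∈ M.primeFactors, i + 1 ≤ q := by
              intro q hqm
              rw [Nat.mem_primeFactors] at hqm
              have hqm' : q ∈ N.primeFactors := by
                rw [Nat.mem_primeFactors]
                exact ⟨hqm.1, hqm.2.1.trans (Dvd.intro_left _ hmM), by omega⟩
              have h1 := hinv _ hqm'
              have h2 : q ≠ i := fun hc => hndvd (hc ▸ hqm.2.1)
              omega
            have hout := (ih g (by omega)).2 M (i+1)
              (r ++ pyStrMul "|" (PySem.Int.mod (Pint i) (i:ℤ)) ++ int2barbrack_alt ((e:ℕ):ℤ))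
              hMpos (by omega) hqM (by omega)
            rw [Pint_succ (show 1 ≤ i by omega)] at hout
            push_cast at hout
            rw [hout]
            -- align with the canonical body of N from position i
            rw [hcnt, List.range'_succ]
            have hentry : entryE N i
                = pyStrMul "|" (PySem.Int.mod (Pint i) (i:ℤ)) ++ int2barbrack_alt ((e:ℕ):ℤ) := by
              rw [entryE, if_pos hip, Pint_mod (by omega), he]
              by_cases h2 : i = 2
              · simp [h2, pyStrMul_nonpos]
              · rw [if_neg h2, if_pos (show i.Prime ∧ i ≠ 2 from ⟨hip, h2⟩), pyStrMul_one]
            have htail : List.map (entryE N) (List.range' (i+1) (Lpf N - i))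
                = List.map (entryE M) (List.range' (i+1) (Lpf M - i)) := by
              rcases Nat.lt_or_ge M 2 with hM1 | hM2'
              · have hMeq : M = 1 := by omega
                have hLN : Lpf N = i := by
                  rw [hMeq] at hmM
                  rw [← hmM]
                  simpa using Lpf_prime_pow hip (by omega)
                rw [hMeq, hLN, Lpf_one]
                simp [show 0 - i = 0 from by omega]
              · have hLeq : Lpf N = Lpf M := by
                  rw [← hmM]
                  exact Lpf_mul_pow hip (by omega) hM2' (fun q hqm => by
                    have := hqM q hqm; omega)
                rw [hLeq]
                apply List.map_congr_left
                intro q hq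
                have hqi : q ≠ i := by
                  have := List.mem_range'.1 hq
                  omega
                rw [← hmM]
                exact entry_transfer hip (by omega) hqi
            simp only [bodyE, List.map_cons, catS]
            rw [hentry, htail]
            simp [String.append_assoc]
          · -- i does not divide N: nothing happens at this position
            have hdivA := divLoopA_no (show 0 < i by omega) hdvd N (1:ℤ)
            rw [hdivA]
            simp only []
            rw [show (1:ℤ) - 1 = 0 from by ring, bbA_zero g hg1]
            have hinv' : ∀ q ∈ N.primeFactors, i + 1 ≤ q := by
              intro q hqm
              have h1 := hinv _ hqm
              have h2 : q ≠ i := fun hc => hdvd (hc ▸ (Nat.mem_primeFactors.1 hqm).2.1)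
              omega
            have hout := (ih g (by omega)).2 N (i+1)
              (r ++ pyStrMul "|" (PySem.Int.mod (Pint i) (i:ℤ)) ++ "")
              (by omega) (by omega) hinv' (by omega)
            rw [Pint_succ (show 1 ≤ i by omega)] at hout
            push_cast at hout
            rw [hout]
            rw [hcnt, List.range'_succ]
            have hfz : N.factorization i = 0 := Nat.factorization_eq_zero_of_not_dvd hdvd
            have halt0 : int2barbrack_alt ((0:ℕ):ℤ) = "" := by
              rw [alt_eq_canon]
              simp [canonE]
            have hentry : entryE N i
                = pyStrMul "|" (PySem.Int.mod (Pint i) (i:ℤ)) ++ "" := by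
              rw [entryE, Pint_mod (by omega)]
              by_cases hip : i.Prime
              · rw [if_pos hip, hfz, halt0]
                by_cases h2 : i = 2
                · simp [h2, pyStrMul_nonpos]
                · rw [if_neg h2, if_pos (show i.Prime ∧ i ≠ 2 from ⟨hip, h2⟩), pyStrMul_one]
              · rw [if_neg hip, if_neg (show ¬ (i.Prime ∧ i ≠ 2) from by tauto),
                  pyStrMul_nonpos _ _ (le_refl 0)]
                simp [String.append_empty]
            simp only [bodyE, List.map_cons, catS]
            rw [hentry]
            simp [String.append_assoc, String.append_empty]

-- ===== VERDICT (by name: the statement is the Claim_ definition above) =====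
theorem int2barbrack_spec : Claim_equal_int2barbrack := by
  intro n _
  unfold Spec_int2barbrack
  by_cases h : n < 1
  · rw [int2barbrack, bbA, if_pos h]
    rw [int2barbrack_alt, bbB, if_pos h]
  · obtain ⟨N, rfl⟩ : ∃ N : ℕ, n = (N : ℤ) := ⟨n.toNat, by omega⟩
    rw [int2barbrack, Int.toNat_natCast]
    exact (jointA (4 * N + 2)).1 N (le_refl _)
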